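-- pv_equiv track=rewrite | github.com/kubeflow/website | scripts/nb_to_md.py | format_as_terminal
-- ===== SOURCE A (Python) =====
-- def format_as_terminal(commands: str) -> str:
--   """Formats a command block to indicate that it contains terminal commands.
--
--   Args:
--     commands: The command block to format.
--
--   Returns:
--     The reformatted command block.
--   """
--
--   lines = commands.split('\n')
--   buffer = []
--   for line in lines:
--     if line.startswith('!'):
--       line = '$ {}'.format(line[1:])
--     buffer.append(line)
--   return '\n'.join(buffer)
-- ===== SOURCE B (Python) =====
-- def format_as_terminal(commands: str) -> str:
--   """Formats a command block to indicate that it contains terminal commands.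
--
--   Single left-to-right character scan: a '!' seen at the start of a line
--   (string start or right after a newline) is emitted as '$ '; every other
--   character is copied through.  No intermediate list of lines is built.
--   """
--   out = []
--   bol = True
--   for c in commands:
--     if bol and c == '!':
--       out.append('$ ')
--       bol = False
--     else:
--       out.append(c)
--       bol = c == '\n'
--   return ''.join(out)
-- ===== Notes on version B (the rewrite author's own statement) =====
-- stated objective: alternative
-- what changed: Replaced split-into-lines / per-line rewrite / join with a single character-level scan that tracks whether it is at the start of a line and rewrites a leading '!' to '$ ' on the fly, never materialising the list of lines.
import Mathlib
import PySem

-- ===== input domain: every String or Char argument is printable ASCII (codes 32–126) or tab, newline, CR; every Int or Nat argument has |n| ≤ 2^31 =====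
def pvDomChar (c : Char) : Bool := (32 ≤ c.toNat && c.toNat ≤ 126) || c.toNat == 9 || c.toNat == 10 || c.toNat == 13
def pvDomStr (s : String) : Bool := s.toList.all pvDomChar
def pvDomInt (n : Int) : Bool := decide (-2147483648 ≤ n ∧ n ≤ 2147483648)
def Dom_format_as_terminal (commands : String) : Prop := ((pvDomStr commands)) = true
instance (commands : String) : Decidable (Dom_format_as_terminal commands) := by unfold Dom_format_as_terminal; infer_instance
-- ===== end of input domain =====

-- B replaces A's split-lines/rewrite/join with a single character scan tracking line starts (alternative decomposition, same O(n) cost).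


-- ===== PORT A =====
-- '$ {}'.format(line[1:]) is the literal concatenation '$', ' ', line[1:]; work is on code points (List Char), exact for str.
def fmtLineA (line : List Char) : List Char :=
  if PySem.Chars.startswith line ['!'] then '$' :: ' ' :: PySem.Chars.slice line (some 1) none
  else line

def format_as_terminal (commands : String) : String :=
  let lines := PySem.Chars.splitOn commands.toList ['\n']
  let buffer := lines.foldl (fun buf line => buf ++ [fmtLineA line]) []
  String.ofList (PySem.Chars.join ['\n'] buffer)

-- ===== PORT B =====
-- Source B's for-loop over the characters with its (out, bol) state as a foldl; ''.join(out) is String.ofList. Exact hand port.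
def altStep (st : List Char × Bool) (c : Char) : List Char × Bool :=
  if st.2 && c == '!' then (st.1 ++ ['$', ' '], false)
  else (st.1 ++ [c], c == '\n')

def format_as_terminal_alt (commands : String) : String :=
  String.ofList (commands.toList.foldl altStep ([], true)).1

-- ===== PRECONDITION & SPEC =====
def Spec_format_as_terminal (commands : String) (out : String) : Prop := out = format_as_terminal_alt commands
instance (commands : String) (out : String) : Decidable (Spec_format_as_terminal commands out) := by unfold Spec_format_as_terminal; infer_instance

-- ===== CLAIM (what is proved, stated in full; the proofs are below) =====
def Claim_equal_format_as_terminal : Prop := ∀ (commands : String), Dom_format_as_terminal commands → Spec_format_as_terminal commands (format_as_terminal commands)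

-- ===== LEMMAS AND PROOFS =====

-- Reference recursion for B's loop: what the scan appends from a given beginning-of-line flag.
def altGo : Bool → List Char → List Char
  | _, [] => []
  | bol, c :: rest =>
    if bol && c == '!' then '$' :: ' ' :: altGo false rest
    else c :: altGo (c == '\n') rest

theorem altStep_foldl (l : List Char) : ∀ (acc : List Char) (bol : Bool),
    (l.foldl altStep (acc, bol)).1 = acc ++ altGo bol l := by
  induction l with
  | nil => intro acc bol; simp [altGo]
  | cons c rest ih =>
    intro acc bol
    by_cases h : bol && c == '!'
    · simp [altStep, altGo, h, ih]
    · simp [altStep, altGo, h, ih]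

-- Simple structural recursion computing commands.split('\n').
def splitNl : List Char → List (List Char)
  | [] => [[]]
  | c :: rest =>
    if c = '\n' then [] :: splitNl rest
    else (c :: (splitNl rest).headI) :: (splitNl rest).tail

theorem splitNl_ne_nil (l : List Char) : splitNl l ≠ [] := by
  cases l with
  | nil => simp [splitNl]
  | cons c rest => by_cases h : c = '\n' <;> simp [splitNl, h]

theorem splitOn_go_spec (fuel : Nat) : ∀ (l cur : List Char) (accs : List (List Char)),
    l.length < fuel →
    PySem.Chars.splitOn.go ['\n'] fuel l cur accs =
      accs.reverse ++ ((cur.reverse ++ (splitNl l).headI) :: (splitNl l).tail) := by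
  induction fuel with
  | zero => intro l cur accs h; omega
  | succ f ih =>
    intro l cur accs h
    cases l with
    | nil => simp [PySem.Chars.splitOn.go, splitNl]
    | cons c rest =>
      obtain ⟨hd, ts, hsp2⟩ : ∃ hd ts, splitNl rest = hd :: ts := by
        cases hh : splitNl rest with
        | nil => exact absurd hh (splitNl_ne_nil rest)
        | cons a as => exact ⟨a, as, rfl⟩
      by_cases hn : c = '\n'
      · subst hn
        rw [PySem.Chars.splitOn.go]
        have hpre : List.isPrefixOf ['\n'] ('\n' :: rest) = true := by
          simp [List.isPrefixOf]
        simp only [hpre, if_pos, List.length_cons, List.length_nil, List.drop_succ_cons, List.drop_zero]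
        rw [ih rest [] (cur.reverse :: accs) (by simpa using Nat.lt_of_succ_lt_succ h)]
        simp [splitNl, hsp2]
      · rw [PySem.Chars.splitOn.go]
        have hpre : List.isPrefixOf ['\n'] (c :: rest) = false := by
          simp [List.isPrefixOf]
          exact fun hh => absurd hh.symm hn
        simp only [hpre, Bool.false_eq_true, if_neg, reduceCtorEq]
        rw [ih rest (c :: cur) accs (by simpa using Nat.lt_of_succ_lt_succ h)]
        simp [splitNl, hn, hsp2]

theorem splitOn_eq_splitNl (l : List Char) :
    PySem.Chars.splitOn l ['\n'] = splitNl l := by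
  rw [PySem.Chars.splitOn, splitOn_go_spec (l.length + 1) l [] [] (by omega)]
  simp
  cases hh : splitNl l with
  | nil => exact absurd hh (splitNl_ne_nil l)
  | cons a as => simp

theorem foldl_append_map {α β : Type} (f : α → β) (l : List α) : ∀ (acc : List β),
    l.foldl (fun buf x => buf ++ [f x]) acc = acc ++ l.map f := by
  induction l with
  | nil => intro acc; simp
  | cons x xs ih => intro acc; simp [ih]

theorem join_head_cons (x : Char) (a : List Char) (xs : List (List Char)) :
    PySem.Chars.join ['\n'] ((x :: a) :: xs) = x :: PySem.Chars.join ['\n'] (a :: xs) := by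
  cases xs <;> simp [PySem.Chars.join, List.intercalate, List.intersperse]

theorem join_nil_cons (xs : List (List Char)) (hx : xs ≠ []) :
    PySem.Chars.join ['\n'] ([] :: xs) = '\n' :: PySem.Chars.join ['\n'] xs := by
  cases xs with
  | nil => exact absurd rfl hx
  | cons a as => simp [PySem.Chars.join, List.intercalate, List.intersperse]

theorem main_scan (l : List Char) :
    (PySem.Chars.join ['\n'] ((splitNl l).map fmtLineA) = altGo true l) ∧
    (altGo false l = PySem.Chars.join ['\n'] ((splitNl l).headI :: (splitNl l).tail.map fmtLineA)) := by
  induction l with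
  | nil =>
    constructor
    · simp [splitNl, fmtLineA, altGo, PySem.Chars.join, List.intercalate,
        PySem.Chars.startswith]
    · simp [splitNl, altGo, PySem.Chars.join, List.intercalate]
  | cons c rest ih =>
    obtain ⟨ih1, ih2⟩ := ih
    obtain ⟨hd, ts, hsp2⟩ : ∃ hd ts, splitNl rest = hd :: ts := by
      cases h : splitNl rest with
      | nil => exact absurd h (splitNl_ne_nil rest)
      | cons a as => exact ⟨a, as, rfl⟩
    rw [hsp2] at ih1 ih2
    simp only [List.headI, List.tail] at ih2
    constructor
    · by_cases hb : c = '!'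
      · subst hb
        have hsp : splitNl ('!' :: rest) = ('!' :: hd) :: ts := by simp [splitNl, hsp2]
        rw [hsp]
        simp only [List.map_cons]
        have hfmt : fmtLineA ('!' :: hd) = '$' :: ' ' :: hd := by
          simp [fmtLineA, PySem.Chars.startswith, PySem.List.slice_from_one]
        rw [hfmt, join_head_cons, join_head_cons]
        simp [altGo, ih2]
      · by_cases hn : c = '\n'
        · subst hn
          have hsp : splitNl ('\n' :: rest) = [] :: splitNl rest := by simp [splitNl]
          rw [hsp]
          simp only [List.map_cons]
          have hf : fmtLineA [] = [] := by simp [fmtLineA, PySem.Chars.startswith]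
          rw [hf, join_nil_cons _ (by simp [splitNl_ne_nil])]
          simp only [altGo]
          rw [hsp2]
          simpa using ih1
        · have hsp : splitNl (c :: rest) = (c :: hd) :: ts := by simp [splitNl, hn, hsp2]
          rw [hsp]
          simp only [List.map_cons]
          have hfmt : fmtLineA (c :: hd) = c :: hd := by
            simp only [fmtLineA, PySem.Chars.startswith, List.isPrefixOf]
            simp
            exact fun h => absurd h.symm hb
          have hcn : (c == '\n') = false := by simp [hn]
          rw [hfmt, join_head_cons]
          simp only [altGo, hcn]
          simp [hb, ih2.symm]
    · by_cases hn : c = '\n'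
      · subst hn
        have hsp : splitNl ('\n' :: rest) = [] :: splitNl rest := by simp [splitNl]
        rw [hsp]
        simp only [List.headI, List.tail]
        rw [join_nil_cons _ (by simp [splitNl_ne_nil])]
        simp only [altGo]
        rw [hsp2]
        simpa using ih1.symm
      · have hsp : splitNl (c :: rest) = (c :: hd) :: ts := by simp [splitNl, hn, hsp2]
        rw [hsp]
        simp only [List.headI, List.tail, List.map_cons]
        have hcn : (c == '\n') = false := by simp [hn]
        rw [join_head_cons]
        simp only [altGo, hcn]
        simp [ih2]

-- ===== VERDICT (by name: the statement is the Claim_ definition above) =====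
theorem format_as_terminal_spec : Claim_equal_format_as_terminal := by
  intro commands _
  unfold Spec_format_as_terminal format_as_terminal format_as_terminal_alt
  simp only [splitOn_eq_splitNl, foldl_append_map, List.nil_append, altStep_foldl,
    (main_scan commands.toList).1]
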